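-- pv_equiv track=rewrite | github.com/JingyangYi/GradPilot_DataBase | compass/program_names_extraction/university_ranking_matcher.py | _create_subject_field_name
-- ===== SOURCE A (Python) =====
-- def _create_subject_field_name(subject_name):
--     """根据QS学科名称创建字段名"""
--     # 清理学科名称，转换为适合字段名的格式
--     field_name = subject_name.lower()
--
--     # 替换特殊字符和空格
--     replacements = {
--         ' ': '_',
--         '&': 'and',
--         '-': '_',
--         '$': '',
--         '/': '_',
--         '.': '',
--         ',': '',
--         '(': '',
--         ')': '',
--         "'": '',
--         '"': ''
--     }
--
--     for old, new in replacements.items():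
--         field_name = field_name.replace(old, new)
--
--     # 去除多余的下划线
--     while '__' in field_name:
--         field_name = field_name.replace('__', '_')
--
--     field_name = field_name.strip('_')
--
--     # 添加前缀
--     return f"qs_2026_{field_name}_rank"
-- ===== SOURCE B (Python) =====
-- _TABLE = {
--     ' ': '_',
--     '&': 'and',
--     '-': '_',
--     '$': '',
--     '/': '_',
--     '.': '',
--     ',': '',
--     '(': '',
--     ')': '',
--     "'": '',
--     '"': '',
-- }
--
--
-- def _create_subject_field_name(subject_name):
--     """Single-pass table-driven build of the field name."""
--     out = []
--     for ch in subject_name.lower():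
--         for r in _TABLE.get(ch, ch):
--             if r == '_' and out and out[-1] == '_':
--                 continue  # collapse runs of underscores as we go
--             out.append(r)
--     core = ''.join(out).strip('_')
--     return f"qs_2026_{core}_rank"
-- ===== Notes on version B (the rewrite author's own statement) =====
-- stated objective: alternative
-- what changed: Replaces the eleven sequential full-string replace passes plus the repeated double-underscore-collapse while loop with one table-driven left-to-right pass that emits each character's translation and skips an underscore when the previously emitted character is already an underscore.
import Mathlib
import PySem

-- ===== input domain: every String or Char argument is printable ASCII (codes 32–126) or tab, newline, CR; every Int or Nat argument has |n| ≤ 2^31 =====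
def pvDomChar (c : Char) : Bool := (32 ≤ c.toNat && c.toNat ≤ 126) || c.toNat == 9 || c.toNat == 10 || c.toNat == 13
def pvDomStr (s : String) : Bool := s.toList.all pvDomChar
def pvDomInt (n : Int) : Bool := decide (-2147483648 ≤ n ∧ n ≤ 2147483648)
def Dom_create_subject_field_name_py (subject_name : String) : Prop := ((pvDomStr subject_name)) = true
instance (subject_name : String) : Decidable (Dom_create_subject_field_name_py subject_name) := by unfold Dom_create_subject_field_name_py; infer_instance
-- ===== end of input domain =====

-- B replaces A's eleven sequential replace passes and the underscore-collapsing while loop by one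
-- table-driven pass that collapses underscore runs on the fly (objective: alternative single-pass algorithm).


-- ===== PORT A =====
-- helpers the port needs for termination of the '__'-collapse while loop:
-- replGen is a reference recursion equal to PySem.Chars.replace for nonempty `old`.
def replGen (old new : List Char) : List Char → List Char
  | [] => []
  | c :: t =>
    if old.isPrefixOf (c :: t) then new ++ replGen old new (t.drop (old.length - 1))
    else c :: replGen old new t
termination_by l => l.length
decreasing_by
  · simp only [List.length_drop, List.length_cons]; omega
  · simp

theorem replGen_go_spec (old new : List Char) (hold : old ≠ []) :
    ∀ (fuel : Nat) (l acc : List Char), l.length ≤ fuel →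
      PySem.Chars.replace.go old new fuel l acc = acc.reverse ++ replGen old new l := by
  intro fuel
  induction fuel with
  | zero =>
    intro l acc h
    have : l = [] := List.eq_nil_of_length_eq_zero (Nat.le_zero.mp h)
    subst this; simp [PySem.Chars.replace.go, replGen]
  | succ n ih =>
    intro l acc h
    match l with
    | [] => simp [PySem.Chars.replace.go, replGen]
    | c :: t =>
      rw [PySem.Chars.replace.go]
      by_cases hp : old.isPrefixOf (c :: t)
      · rw [if_pos hp]
        have h1 : 1 ≤ old.length := by
          cases old with | nil => exact absurd rfl hold | cons _ _ => simp
        have hdrop : List.drop old.length (c :: t) = t.drop (old.length - 1) := by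
          conv_lhs => rw [show old.length = (old.length - 1) + 1 by omega]
          rw [List.drop_succ_cons]
        have hlen : (List.drop old.length (c :: t)).length ≤ n := by
          rw [hdrop]
          have : (t.drop (old.length - 1)).length = t.length - (old.length - 1) := List.length_drop ..
          simp at h; omega
        rw [ih _ _ hlen, hdrop]
        simp [replGen, hp]
      · rw [if_neg hp]
        have hlen : t.length ≤ n := by simp at h; omega
        rw [ih _ _ hlen]
        simp [replGen, hp]

theorem replace_eq_replGen (s old new : List Char) (hold : old ≠ []) :
    PySem.Chars.replace s old new = replGen old new s := by
  rw [PySem.Chars.replace]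
  rw [if_neg (by simpa using hold)]
  simpa using replGen_go_spec old new hold s.length s [] le_rfl

theorem replGen_length_le (old new : List Char) (hnew : new.length < old.length) :
    ∀ l, (replGen old new l).length ≤ l.length := by
  intro l
  induction l using replGen.induct old with
  | case1 => simp [replGen]
  | case2 c t hp ih =>
    rw [replGen, if_pos hp]
    have hd : (t.drop (old.length - 1)).length = t.length - (old.length - 1) := List.length_drop ..
    rw [hd] at ih
    have hol : old.length ≤ t.length + 1 := by
      simpa using (List.isPrefixOf_iff_prefix.mp hp).length_le
    simp only [List.length_append, List.length_cons]
    omega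
  | case3 c t hp ih =>
    rw [replGen, if_neg hp]; simpa using ih

theorem replGen_length_lt (l : List Char)
    (h : ['_', '_'] <:+: l) : (replGen ['_', '_'] ['_'] l).length < l.length := by
  induction l using replGen.induct ['_', '_'] with
  | case1 => simp at h
  | case2 c t hp ih =>
    rw [replGen, if_pos hp]
    have h2 := replGen_length_le ['_', '_'] ['_'] (by simp) t.tail
    have hd : t.tail.length = t.length - 1 := List.length_tail
    have hol : (2 : Nat) ≤ t.length + 1 := by
      simpa using (List.isPrefixOf_iff_prefix.mp hp).length_le
    rw [hd] at h2
    norm_num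
    omega
  | case3 c t hp ih =>
    rw [replGen, if_neg hp]
    rcases List.infix_cons_iff.mp h with hpre | hinf
    · exact absurd (List.isPrefixOf_iff_prefix.mpr hpre) hp
    · have := ih hinf; simp; omega

theorem len_collapse_dec (s : String) (h : PySem.Str.isIn "__" s = true) :
    (PySem.Str.replace s "__" "_").toList.length < s.toList.length := by
  rw [PySem.Str.toList_replace]
  have hinf : ("__" : String).toList <:+: s.toList := (PySem.Str.isIn_iff_infix _ _).mp h
  rw [replace_eq_replGen _ _ _ (by decide)]
  exact replGen_length_lt s.toList (by simpa using hinf)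

def pyReplacements : List (String × String) :=
  [(" ", "_"), ("&", "and"), ("-", "_"), ("$", ""), ("/", "_"), (".", ""),
   (",", ""), ("(", ""), (")", ""), ("'", ""), ("\"", "")]

-- the while loop of A that repeatedly collapses doubled underscores
def collapseLoop (s : String) : String :=
  if h : PySem.Str.isIn "__" s = true then collapseLoop (PySem.Str.replace s "__" "_") else s
termination_by s.toList.length
decreasing_by exact len_collapse_dec s h

def create_subject_field_name_py (subject_name : String) : String :=
  let field0 := PySem.Str.lower subject_name
  let field1 := pyReplacements.foldl (fun f p => PySem.Str.replace f p.1 p.2) field0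
  let field2 := collapseLoop field1
  let field3 := PySem.Str.stripChars field2 "_"
  "qs_2026_" ++ field3 ++ "_rank"

-- ===== PORT B =====
def bTable (c : Char) : List Char :=
  if c = ' ' ∨ c = '-' ∨ c = '/' then ['_']
  else if c = '&' then ['a', 'n', 'd']
  else if c = '$' ∨ c = '.' ∨ c = ',' ∨ c = '(' ∨ c = ')' ∨ c = '\'' ∨ c = '"' then []
  else [c]

-- `if r == '_' and out and out[-1] == '_': continue; out.append(r)`
def bStep (acc : List Char) (c : Char) : List Char :=
  if c = '_' ∧ acc.getLast? = some '_' then acc else acc ++ [c]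

def create_subject_field_name_py_alt (subject_name : String) : String :=
  let out := (PySem.Str.lower subject_name).toList.foldl
    (fun acc ch => (bTable ch).foldl bStep acc) []
  let core := PySem.Chars.stripChars out ['_']
  "qs_2026_" ++ String.ofList core ++ "_rank"

-- ===== PRECONDITION & SPEC =====
def Spec_create_subject_field_name_py (subject_name : String) (out : String) : Prop := out = create_subject_field_name_py_alt subject_name
instance (subject_name : String) (out : String) : Decidable (Spec_create_subject_field_name_py subject_name out) := by unfold Spec_create_subject_field_name_py; infer_instance

-- ===== CLAIM (what is proved, stated in full; the proofs are below) =====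
def Claim_equal_create_subject_field_name_py : Prop := ∀ (subject_name : String), Dom_create_subject_field_name_py subject_name → Spec_create_subject_field_name_py subject_name (create_subject_field_name_py subject_name)

-- ===== LEMMAS AND PROOFS =====

-- collapse of underscore runs, threading the last emitted character
def squeezeFrom : Option Char → List Char → List Char
  | _, [] => []
  | p, c :: t => if c = '_' ∧ p = some '_' then squeezeFrom p t else c :: squeezeFrom (some c) t

-- per-character translation performed by A's replace chain
def rstep (o : Char) (new : List Char) (c : Char) : List Char := if c = o then new else [c]

theorem replGen_single (o : Char) (new : List Char) :
    ∀ l, replGen [o] new l = l.flatMap (rstep o new) := by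
  intro l
  induction l with
  | nil => simp [replGen]
  | cons c t ih =>
    rw [replGen]
    by_cases hc : c = o
    · rw [if_pos (by simp [hc, List.isPrefixOf])]
      simp [rstep, hc, ih]
    · rw [if_neg (by simp [List.isPrefixOf]; exact fun h => hc h.symm)]
      simp [rstep, hc, ih]

theorem str_replace_single (s : String) (oS new : String) (o : Char) (ho : oS.toList = [o]) :
    (PySem.Str.replace s oS new).toList = s.toList.flatMap (rstep o new.toList) := by
  rw [PySem.Str.toList_replace, ho, replace_eq_replGen _ _ _ (by simp), replGen_single]

theorem chain_point (c : Char) :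
    (rstep ' ' ['_'] c).flatMap (fun c => (rstep '&' ['a','n','d'] c).flatMap (fun c =>
      (rstep '-' ['_'] c).flatMap (fun c => (rstep '$' [] c).flatMap (fun c =>
      (rstep '/' ['_'] c).flatMap (fun c => (rstep '.' [] c).flatMap (fun c =>
      (rstep ',' [] c).flatMap (fun c => (rstep '(' [] c).flatMap (fun c =>
      (rstep ')' [] c).flatMap (fun c => (rstep '\'' [] c).flatMap (fun c =>
      (rstep '"' [] c)))))))))))
      = bTable c := by
  by_cases h1 : c = ' '; · subst h1; decide
  by_cases h2 : c = '&'; · subst h2; decide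
  by_cases h3 : c = '-'; · subst h3; decide
  by_cases h4 : c = '$'; · subst h4; decide
  by_cases h5 : c = '/'; · subst h5; decide
  by_cases h6 : c = '.'; · subst h6; decide
  by_cases h7 : c = ','; · subst h7; decide
  by_cases h8 : c = '('; · subst h8; decide
  by_cases h9 : c = ')'; · subst h9; decide
  by_cases h10 : c = '\''; · subst h10; decide
  by_cases h11 : c = '"'; · subst h11; decide
  simp [rstep, bTable, h1, h2, h3, h4, h5, h6, h7, h8, h9, h10, h11]

theorem chain_eq (l : List Char) :
    (pyReplacements.foldl (fun f p => PySem.Str.replace f p.1 p.2) (String.ofList l)).toList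
      = l.flatMap bTable := by
  simp only [pyReplacements, List.foldl_cons, List.foldl_nil]
  rw [str_replace_single _ _ _ '"' (by decide), str_replace_single _ _ _ '\'' (by decide),
      str_replace_single _ _ _ ')' (by decide), str_replace_single _ _ _ '(' (by decide),
      str_replace_single _ _ _ ',' (by decide), str_replace_single _ _ _ '.' (by decide),
      str_replace_single _ _ _ '/' (by decide), str_replace_single _ _ _ '$' (by decide),
      str_replace_single _ _ _ '-' (by decide), str_replace_single _ _ _ '&' (by decide),
      str_replace_single _ _ _ ' ' (by decide)]
  simp only [List.flatMap_assoc, String.toList_ofList]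
  have : ∀ c, (rstep ' ' ("_").toList c).flatMap (fun c => (rstep '&' ("and").toList c).flatMap (fun c =>
      (rstep '-' ("_").toList c).flatMap (fun c => (rstep '$' ("").toList c).flatMap (fun c =>
      (rstep '/' ("_").toList c).flatMap (fun c => (rstep '.' ("").toList c).flatMap (fun c =>
      (rstep ',' ("").toList c).flatMap (fun c => (rstep '(' ("").toList c).flatMap (fun c =>
      (rstep ')' ("").toList c).flatMap (fun c => (rstep '\'' ("").toList c).flatMap (fun c =>
      (rstep '"' ("").toList c)))))))))))
      = bTable c := by
    intro c
    have := chain_point c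
    simpa using this
  congr 1
  funext c
  exact this c

theorem squeeze_replGen (l : List Char) :
    ∀ p : Option Char, squeezeFrom p (replGen ['_', '_'] ['_'] l) = squeezeFrom p l := by
  induction l using replGen.induct ['_', '_'] with
  | case1 => simp [replGen]
  | case2 c t hp ih =>
    obtain ⟨u, hu⟩ := List.isPrefixOf_iff_prefix.mp hp
    simp only [List.cons_append, List.nil_append] at hu
    obtain ⟨hc, ht⟩ := List.cons.inj hu
    subst hc
    subst ht
    have hdrop : List.drop (['_', '_'].length - 1) ('_' :: u) = u := rfl
    rw [hdrop] at ih
    intro p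
    rw [replGen, if_pos hp, hdrop, List.singleton_append]
    by_cases hp' : p = some '_'
    · rw [squeezeFrom, if_pos (by simp [hp']), squeezeFrom, if_pos (by simp [hp']),
        squeezeFrom, if_pos (by simp [hp'])]
      exact ih p
    · rw [squeezeFrom, if_neg (by simp [hp']), squeezeFrom, if_neg (by simp [hp']),
        squeezeFrom, if_pos (by simp)]
      exact congrArg _ (ih (some '_'))
  | case3 c t hp ih =>
    intro p
    rw [replGen, if_neg hp]
    by_cases hc : c = '_' ∧ p = some '_'
    · simp only [squeezeFrom, hc, and_self, if_true]
      exact ih _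
    · simp only [squeezeFrom, if_neg hc]
      exact congrArg _ (ih (some c))

theorem squeeze_of_no_dbl : ∀ (l : List Char) (p : Option Char), ¬ ['_', '_'] <:+: l →
    (p = some '_' → l.head? ≠ some '_') → squeezeFrom p l = l := by
  intro l
  induction l with
  | nil => intro p _ _; rfl
  | cons c t ih =>
    intro p hl hp
    have hnt : ¬ ['_', '_'] <:+: t := fun h => hl (List.infix_cons_iff.mpr (Or.inr h))
    by_cases hc : c = '_'
    · have hph : ¬ p = some '_' := fun h => (hp h) (by simp [hc])
      rw [squeezeFrom, if_neg (by tauto)]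
      refine congrArg _ (ih (some c) hnt ?_)
      intro _ hth
      cases t with
      | nil => simp at hth
      | cons d t' =>
        have hd : d = '_' := by simpa using hth
        exact hl (List.IsPrefix.isInfix (by rw [hc, hd]; exact ⟨t', rfl⟩))
    · rw [squeezeFrom, if_neg (by tauto)]
      refine congrArg _ (ih (some c) hnt ?_)
      intro h
      exact absurd (Option.some.inj h) hc

theorem collapseLoop_eq_squeeze (s : String) :
    (collapseLoop s).toList = squeezeFrom none s.toList := by
  fun_induction collapseLoop s with
  | case1 s h ih =>
    rw [ih, PySem.Str.toList_replace,
      show ("__" : String).toList = ['_', '_'] from rfl,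
      show ("_" : String).toList = ['_'] from rfl,
      replace_eq_replGen _ _ _ (by simp), squeeze_replGen]
  | case2 s h =>
    have hinf : ¬ ['_', '_'] <:+: s.toList := by
      intro hi
      exact h ((PySem.Str.isIn_iff_infix "__" s).mpr hi)
    exact (squeeze_of_no_dbl s.toList none hinf (by simp)).symm

theorem foldl_bStep_eq (l : List Char) :
    ∀ acc, l.foldl bStep acc = acc ++ squeezeFrom acc.getLast? l := by
  induction l with
  | nil => intro acc; simp [squeezeFrom]
  | cons c t ih =>
    intro acc
    rw [List.foldl_cons]
    by_cases hc : c = '_' ∧ acc.getLast? = some '_'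
    · rw [show bStep acc c = acc from if_pos hc, ih, squeezeFrom, if_pos hc]
    · rw [show bStep acc c = acc ++ [c] from if_neg hc, ih, squeezeFrom, if_neg hc,
        List.getLast?_concat, List.append_assoc, List.singleton_append]

-- ===== VERDICT (by name: the statement is the Claim_ definition above) =====
theorem create_subject_field_name_py_spec : Claim_equal_create_subject_field_name_py := by
  intro s _
  unfold Spec_create_subject_field_name_py create_subject_field_name_py
    create_subject_field_name_py_alt
  apply String.toList_inj.mp
  have hchain : (pyReplacements.foldl (fun f p => PySem.Str.replace f p.1 p.2)
      (PySem.Str.lower s)).toList = (PySem.Str.lower s).toList.flatMap bTable := by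
    rw [show PySem.Str.lower s = String.ofList (PySem.Str.lower s).toList from
      (String.ofList_toList).symm, chain_eq, String.toList_ofList]
  have hB : (PySem.Str.lower s).toList.foldl (fun acc ch => (bTable ch).foldl bStep acc) []
      = squeezeFrom none ((PySem.Str.lower s).toList.flatMap bTable) := by
    rw [← List.foldl_flatMap, foldl_bStep_eq]
    rfl
  simp only [String.toList_append, PySem.Str.toList_stripChars, String.toList_ofList,
    collapseLoop_eq_squeeze, hchain, hB, show ("_" : String).toList = ['_'] from rfl]
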